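-- pv_equiv track=rewrite | github.com/abdo-elshaikh/Ai-Cephalometric-Analysis | ai_service/engines/measurement_engine.py | _quality_for_refs
-- ===== SOURCE A (Python) =====
-- from typing import Optional, Callable, Dict, List, Any
--
-- def _quality_for_refs(
--     refs: list[str],
--     landmark_provenance: Optional[dict[str, str]] = None,
-- ) -> tuple[str, list[str], dict[str, str] | None]:
--     if not landmark_provenance:
--         return "clinically_usable", [], None
--     used = {ref: landmark_provenance.get(ref, "unknown") for ref in refs}
--     fallback_refs = [r for r, s in used.items() if s == "fallback"]
--     derived_refs  = [r for r, s in used.items() if s == "derived"]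
--     unknown_refs  = [r for r, s in used.items() if s == "unknown"]
--     reasons: list[str] = []
--     if fallback_refs: reasons.append(f"Fallback landmark(s): {', '.join(fallback_refs)}")
--     if derived_refs:  reasons.append(f"Derived landmark(s): {', '.join(derived_refs)}")
--     if unknown_refs:  reasons.append(f"Unknown provenance: {', '.join(unknown_refs)}")
--     if fallback_refs: return "manual_review_required", reasons, used
--     if derived_refs or unknown_refs: return "provisional", reasons, used
--     return "clinically_usable", [], used
-- ===== SOURCE B (Python) =====
-- from typing import Optional
--
-- def _quality_for_refs(
--     refs: list[str],
--     landmark_provenance: Optional[dict[str, str]] = None,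
-- ) -> tuple[str, list[str], dict[str, str] | None]:
--     if not landmark_provenance:
--         return "clinically_usable", [], None
--     used: dict[str, str] = {}
--     fb: list[str] = []
--     dv: list[str] = []
--     un: list[str] = []
--     for ref in refs:
--         if ref in used:
--             continue
--         s = landmark_provenance.get(ref, "unknown")
--         used[ref] = s
--         if s == "fallback":
--             fb.append(ref)
--         elif s == "derived":
--             dv.append(ref)
--         elif s == "unknown":
--             un.append(ref)
--     table = (
--         ("Fallback landmark(s): ", fb),
--         ("Derived landmark(s): ", dv),
--         ("Unknown provenance: ", un),
--     )
--     reasons = [label + ", ".join(group) for label, group in table if group]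
--     if fb:
--         return "manual_review_required", reasons, used
--     if dv or un:
--         return "provisional", reasons, used
--     return "clinically_usable", [], used
-- ===== Notes on version B (the rewrite author's own statement) =====
-- stated objective: alternative
-- what changed: Replaces the dict comprehension plus three separate filtered scans over used.items() with a single pass over refs that dedups and classifies each ref into one of three group lists via an if/elif chain, and builds reasons from an ordered (label, group) table instead of three explicit if-blocks.
import Mathlib
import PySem

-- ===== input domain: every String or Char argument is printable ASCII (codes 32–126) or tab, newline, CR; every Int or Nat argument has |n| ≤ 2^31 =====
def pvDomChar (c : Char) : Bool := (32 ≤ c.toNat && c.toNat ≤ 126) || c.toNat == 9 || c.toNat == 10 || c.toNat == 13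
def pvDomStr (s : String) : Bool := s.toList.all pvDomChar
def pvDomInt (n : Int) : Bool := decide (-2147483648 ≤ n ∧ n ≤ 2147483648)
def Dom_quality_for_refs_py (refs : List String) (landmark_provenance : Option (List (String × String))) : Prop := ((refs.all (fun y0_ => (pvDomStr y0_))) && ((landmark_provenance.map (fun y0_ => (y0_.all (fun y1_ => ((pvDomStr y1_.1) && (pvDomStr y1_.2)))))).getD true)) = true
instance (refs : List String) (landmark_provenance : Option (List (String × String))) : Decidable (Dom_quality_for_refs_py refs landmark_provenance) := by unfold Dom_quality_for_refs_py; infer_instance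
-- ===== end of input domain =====

-- B replaces A's dict comprehension + three filtered scans by one classifying pass and a
-- table-driven reasons build (objective: alternative decomposition, same asymptotic cost).

-- ===== PORT A =====
def quality_for_refs_py (refs : List String) (landmark_provenance : Option (List (String × String))) : String × List String × (Option (List (String × String))) :=
  match landmark_provenance with
  | none => ("clinically_usable", [], none)
  | some lpl =>
    if lpl.isEmpty then ("clinically_usable", [], none)
    else
      let lpd := PySem.Dict.mk lpl
      let used := refs.foldl (fun d ref => d.insert ref (lpd.getD ref "unknown")) PySem.Dict.empty
      let fallback_refs := (used.items.filter (fun p => p.2 == "fallback")).map (fun p => p.1)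
      let derived_refs := (used.items.filter (fun p => p.2 == "derived")).map (fun p => p.1)
      let unknown_refs := (used.items.filter (fun p => p.2 == "unknown")).map (fun p => p.1)
      let reasons : List String := []
      let reasons := if fallback_refs.isEmpty then reasons else reasons ++ ["Fallback landmark(s): " ++ PySem.Str.join ", " fallback_refs]
      let reasons := if derived_refs.isEmpty then reasons else reasons ++ ["Derived landmark(s): " ++ PySem.Str.join ", " derived_refs]
      let reasons := if unknown_refs.isEmpty then reasons else reasons ++ ["Unknown provenance: " ++ PySem.Str.join ", " unknown_refs]
      if !fallback_refs.isEmpty then ("manual_review_required", reasons, some used.items)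
      else if !derived_refs.isEmpty || !unknown_refs.isEmpty then ("provisional", reasons, some used.items)
      else ("clinically_usable", [], some used.items)

-- ===== PORT B =====
def pvBStep (lpd : PySem.Dict String String)
    (st : PySem.Dict String String × List String × List String × List String) (ref : String) :
    PySem.Dict String String × List String × List String × List String :=
  match st with
  | (used, fb, dv, un) =>
    if used.contains ref then (used, fb, dv, un)
    else
      let s := lpd.getD ref "unknown"
      let used' := used.insert ref s
      if s == "fallback" then (used', fb ++ [ref], dv, un)
      else if s == "derived" then (used', fb, dv ++ [ref], un)
      else if s == "unknown" then (used', fb, dv, un ++ [ref])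
      else (used', fb, dv, un)

def quality_for_refs_py_alt (refs : List String) (landmark_provenance : Option (List (String × String))) : String × List String × (Option (List (String × String))) :=
  match landmark_provenance with
  | none => ("clinically_usable", [], none)
  | some lpl =>
    if lpl.isEmpty then ("clinically_usable", [], none)
    else
      let lpd := PySem.Dict.mk lpl
      match refs.foldl (pvBStep lpd) (PySem.Dict.empty, [], [], []) with
      | (used, fb, dv, un) =>
        let table := [("Fallback landmark(s): ", fb), ("Derived landmark(s): ", dv), ("Unknown provenance: ", un)]
        let reasons := (table.filter (fun p => !p.2.isEmpty)).map (fun p => p.1 ++ PySem.Str.join ", " p.2)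
        if !fb.isEmpty then ("manual_review_required", reasons, some used.items)
        else if !dv.isEmpty || !un.isEmpty then ("provisional", reasons, some used.items)
        else ("clinically_usable", [], some used.items)

-- ===== PRECONDITION & SPEC =====
def Spec_quality_for_refs_py (refs : List String) (landmark_provenance : Option (List (String × String))) (out : String × List String × (Option (List (String × String)))) : Prop := out = quality_for_refs_py_alt refs landmark_provenance
instance (refs : List String) (landmark_provenance : Option (List (String × String))) (out : String × List String × (Option (List (String × String)))) : Decidable (Spec_quality_for_refs_py refs landmark_provenance out) := by unfold Spec_quality_for_refs_py; infer_instance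

-- ===== CLAIM (what is proved, stated in full; the proofs are below) =====
def Claim_equal_quality_for_refs_py : Prop := ∀ (refs : List String) (landmark_provenance : Option (List (String × String))), Dom_quality_for_refs_py refs landmark_provenance → Spec_quality_for_refs_py refs landmark_provenance (quality_for_refs_py refs landmark_provenance)

-- ===== LEMMAS AND PROOFS =====

-- B's single classifying pass computes A's dict and A's three filtered projections.
theorem pvLoopInv (lpd : PySem.Dict String String) (refs : List String)
    (d : PySem.Dict String String)
    (hnd : d.keys.Nodup) (hval : ∀ p ∈ d.items, p.2 = lpd.getD p.1 "unknown") :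
    refs.foldl (pvBStep lpd)
      (d, (d.items.filter (fun p => p.2 == "fallback")).map (fun p => p.1),
          (d.items.filter (fun p => p.2 == "derived")).map (fun p => p.1),
          (d.items.filter (fun p => p.2 == "unknown")).map (fun p => p.1)) =
    (let d' := refs.foldl (fun d ref => d.insert ref (lpd.getD ref "unknown")) d
     (d', (d'.items.filter (fun p => p.2 == "fallback")).map (fun p => p.1),
          (d'.items.filter (fun p => p.2 == "derived")).map (fun p => p.1),
          (d'.items.filter (fun p => p.2 == "unknown")).map (fun p => p.1))) := by
  induction refs generalizing d with
  | nil => simp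
  | cons r rs ih =>
    simp only [List.foldl_cons]
    by_cases hc : d.contains r = true
    · have hins : d.insert r (lpd.getD r "unknown") = d := by
        apply PySem.Dict.ext
        rw [PySem.Dict.items_insert]
        rw [if_pos hc]
        rw [List.map_congr_left (g := id) ?_, List.map_id]
        intro p hp
        simp only [id]
        by_cases hk : (p.1 == r) = true
        · have hkey : p.1 = r := by simpa using hk
          have hv := hval p hp
          simp [← hkey, ← hv]
        · simp [hk]
      have hstep : pvBStep lpd
          (d, (d.items.filter (fun p => p.2 == "fallback")).map (fun p => p.1),
              (d.items.filter (fun p => p.2 == "derived")).map (fun p => p.1),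
              (d.items.filter (fun p => p.2 == "unknown")).map (fun p => p.1)) r =
          (d, (d.items.filter (fun p => p.2 == "fallback")).map (fun p => p.1),
              (d.items.filter (fun p => p.2 == "derived")).map (fun p => p.1),
              (d.items.filter (fun p => p.2 == "unknown")).map (fun p => p.1)) := by
        simp [pvBStep, hc]
      rw [hstep, ih d hnd hval]
      simp [hins]
    · have hc' : d.contains r = false := by simpa using hc
      have hitems : (d.insert r (lpd.getD r "unknown")).items = d.items ++ [(r, lpd.getD r "unknown")] := by
        rw [PySem.Dict.items_insert, if_neg (by simp [hc'])]
      have hnd' : (d.insert r (lpd.getD r "unknown")).keys.Nodup :=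
        PySem.Dict.nodup_keys_insert _ _ _ hnd
      have hval' : ∀ p ∈ (d.insert r (lpd.getD r "unknown")).items, p.2 = lpd.getD p.1 "unknown" := by
        intro p hp
        rw [hitems] at hp
        rcases List.mem_append.mp hp with h | h
        · exact hval p h
        · simp at h; subst h; rfl
      have hstep : pvBStep lpd
          (d, (d.items.filter (fun p => p.2 == "fallback")).map (fun p => p.1),
              (d.items.filter (fun p => p.2 == "derived")).map (fun p => p.1),
              (d.items.filter (fun p => p.2 == "unknown")).map (fun p => p.1)) r =
          (d.insert r (lpd.getD r "unknown"),
           ((d.insert r (lpd.getD r "unknown")).items.filter (fun p => p.2 == "fallback")).map (fun p => p.1),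
           ((d.insert r (lpd.getD r "unknown")).items.filter (fun p => p.2 == "derived")).map (fun p => p.1),
           ((d.insert r (lpd.getD r "unknown")).items.filter (fun p => p.2 == "unknown")).map (fun p => p.1)) := by
        simp only [pvBStep, hc', Bool.false_eq_true, if_false, hitems, List.filter_append,
          List.map_append]
        by_cases h1 : (lpd.getD r "unknown" == "fallback") = true
        · have h1' : lpd.getD r "unknown" = "fallback" := by simpa using h1
          simp [h1']
        · by_cases h2 : (lpd.getD r "unknown" == "derived") = true
          · have h2' : lpd.getD r "unknown" = "derived" := by simpa using h2
            simp [h2']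
          · by_cases h3 : (lpd.getD r "unknown" == "unknown") = true
            · have h3' : lpd.getD r "unknown" = "unknown" := by simpa using h3
              simp [h3']
            · simp [h1, h2, h3]
      rw [hstep, ih _ hnd' hval']

-- ===== VERDICT (by name: the statement is the Claim_ definition above) =====
theorem quality_for_refs_py_spec : Claim_equal_quality_for_refs_py := by
  intro refs lp _
  unfold Spec_quality_for_refs_py quality_for_refs_py quality_for_refs_py_alt
  cases lp with
  | none => rfl
  | some lpl =>
    by_cases he : lpl.isEmpty = true
    · simp [he]
    · simp only [he, Bool.false_eq_true, if_false]
      have h := pvLoopInv (PySem.Dict.mk lpl) refs PySem.Dict.empty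
        (by simp [PySem.Dict.empty, PySem.Dict.keys])
        (by intro p hp; simp [PySem.Dict.empty] at hp)
      simp only [PySem.Dict.empty, List.filter_nil, List.map_nil] at h
      simp only [PySem.Dict.empty]
      rw [h]
      set d' := refs.foldl (fun d ref => d.insert ref ((PySem.Dict.mk lpl).getD ref "unknown")) (PySem.Dict.mk []) with hd'
      set fb := (d'.items.filter (fun p => p.2 == "fallback")).map (fun p => p.1) with hfb
      set dv := (d'.items.filter (fun p => p.2 == "derived")).map (fun p => p.1) with hdv
      set un := (d'.items.filter (fun p => p.2 == "unknown")).map (fun p => p.1) with hun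
      by_cases e1 : fb.isEmpty = true <;> by_cases e2 : dv.isEmpty = true <;>
        by_cases e3 : un.isEmpty = true <;>
          simp [e1, e2, e3, List.filter_nil]
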